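-- pv_equiv track=rewrite | github.com/Laboratoire-de-Chemoinformatique/SynPlanner | synplan/chem/reaction_routes/visualisation.py | remove_and_shift
-- ===== SOURCE A (Python) =====
-- def remove_and_shift(nested_dict, to_remove):  # Under development
--     """
--     Removes specified inner keys from a nested dictionary and renumbers the remaining keys.
--
--     Given a dictionary where values are themselves dictionaries, this function
--     iterates through each inner dictionary. For each inner dictionary, it
--     creates a new dictionary containing only the key-value pairs where the
--     inner key is NOT present in the `to_remove` list. The keys of the remaining
--     elements in the new inner dictionary are then renumbered sequentially
--     starting from 0, effectively removing gaps left by the removed keys.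
--
--     Args:
--         nested_dict (dict): The input nested dictionary (dict of dicts).
--         to_remove (list): A list of keys to remove from the inner dictionaries.
--
--     Returns:
--         dict: A new nested dictionary with the specified keys removed from
--               inner dictionaries and the remaining inner keys renumbered.
--     """
--     rem_set = set(to_remove)
--
--     result = {}
--     for outer_k, inner in nested_dict.items():
--         new_inner = {}
--         for old_k, v in inner.items():
--             if old_k in rem_set:
--                 continue
--             shift = sum(1 for r in rem_set if r < old_k)
--             new_k = old_k - shift
--             new_inner[new_k] = v
--         result[outer_k] = new_inner
--     return result
-- ===== SOURCE B (Python) =====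
-- def _bisect_left(a, x):
--     # bisect.bisect_left, inlined (the original module imports nothing)
--     lo, hi = 0, len(a)
--     while lo < hi:
--         mid = (lo + hi) // 2
--         if a[mid] < x:
--             lo = mid + 1
--         else:
--             hi = mid
--     return lo
--
--
-- def _new_key(rem, k):
--     # rem is the sorted list of distinct removed keys; one binary search gives
--     # both membership (-> None: key is dropped) and the shift count below k.
--     c = _bisect_left(rem, k)
--     if c < len(rem) and rem[c] == k:
--         return None
--     return k - c
--
--
-- def remove_and_shift(nested_dict, to_remove):
--     # Sort the distinct removal keys once; map each kept inner key directly to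
--     # its renumbered key via one binary search. Renumbered keys never collide
--     # (kept keys stay in strictly increasing order), so the comprehension is a
--     # plain relabelling of each inner dict.
--     rem = sorted(set(to_remove))
--     return {
--         outer_k: {nk: v for k, v in inner.items()
--                   if (nk := _new_key(rem, k)) is not None}
--         for outer_k, inner in nested_dict.items()
--     }
-- ===== Notes on version B (the rewrite author's own statement) =====
-- stated objective: faster
-- what changed: Replaces A's dict-building loops with a per-key O(M) scan of the removal set by one sorted list of the distinct removed keys plus dict comprehensions that relabel each inner key via a single binary search (membership and shift count at once); correctness of the direct relabelling rests on kept keys staying strictly increasing, so renumbered keys never collide.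
import Mathlib
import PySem

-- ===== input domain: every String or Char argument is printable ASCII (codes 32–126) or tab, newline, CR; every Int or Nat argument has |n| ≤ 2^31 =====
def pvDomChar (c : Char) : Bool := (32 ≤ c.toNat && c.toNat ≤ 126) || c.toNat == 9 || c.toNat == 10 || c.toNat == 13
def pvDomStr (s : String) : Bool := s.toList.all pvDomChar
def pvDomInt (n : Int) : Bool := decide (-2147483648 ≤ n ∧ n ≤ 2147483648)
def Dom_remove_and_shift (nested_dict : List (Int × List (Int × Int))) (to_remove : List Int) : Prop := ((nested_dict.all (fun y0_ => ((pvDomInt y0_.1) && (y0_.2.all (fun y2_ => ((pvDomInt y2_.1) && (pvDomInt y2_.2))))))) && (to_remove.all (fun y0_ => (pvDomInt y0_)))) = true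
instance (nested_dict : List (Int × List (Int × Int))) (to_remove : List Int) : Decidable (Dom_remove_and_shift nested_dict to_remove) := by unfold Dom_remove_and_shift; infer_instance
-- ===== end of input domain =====

-- B sorts the distinct removed keys once and relabels each inner key by a single
-- binary search inside dict comprehensions (faster: asymptotic, O(K*M) → O((K+M) log M)).


-- ===== PORT A =====
def remove_and_shift (nested_dict : List (Int × List (Int × Int))) (to_remove : List Int) : List (Int × List (Int × Int)) :=
  let rem_set : PySem.Set Int := PySem.Set.ofList to_remove
  let result : PySem.Dict Int (List (Int × Int)) :=
    nested_dict.foldl (fun result p =>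
      let new_inner : PySem.Dict Int Int :=
        p.2.foldl (fun new_inner q =>
          if PySem.Set.contains rem_set q.1 then new_inner
          else
            -- shift = sum(1 for r in rem_set if r < old_k): a sum over the set, order-independent
            let shift : Int := rem_set.foldl (fun acc r => if r < q.1 then acc + 1 else acc) 0
            new_inner.insert (q.1 - shift) q.2) PySem.Dict.empty
      result.insert p.1 new_inner.items) PySem.Dict.empty
  result.items

-- ===== PORT B =====
-- Source B's _new_key: _bisect_left is bisect.bisect_left inlined, ported as the prelude's primitive
def pvNewKey? (rem : List Int) (k : Int) : Option Int :=
  let c : Nat := PySem.List.bisectLeft rem k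
  if c < rem.length ∧ rem.getD c 0 = k then none else some (k - (c : Int))

-- Source B's two dict comprehensions: keys of a comprehension over a Python dict with the
-- strictly-monotone relabelling pvNewKey? never collide (proved below, under Pre_), so
-- they are exact as List.map / List.filterMap.
def remove_and_shift_alt (nested_dict : List (Int × List (Int × Int))) (to_remove : List Int) : List (Int × List (Int × Int)) :=
  let rem : List Int := PySem.List.sorted (PySem.Set.ofList to_remove) (fun x => x) false
  nested_dict.map (fun p =>
    (p.1, p.2.filterMap (fun q => (pvNewKey? rem q.1).map (fun nk => (nk, q.2)))))

-- ===== PRECONDITION & SPEC =====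
-- Pre_ requires distinct outer keys and distinct keys in every inner dict: duplicate keys
-- cannot arise in the association-list encoding of A's Python dict inputs, so nothing
-- A's Python accepts is excluded.
def Pre_remove_and_shift (nested_dict : List (Int × List (Int × Int))) (_to_remove : List Int) : Prop :=
  (nested_dict.map Prod.fst).Nodup ∧ ∀ p ∈ nested_dict, (p.2.map Prod.fst).Nodup
instance (nested_dict : List (Int × List (Int × Int))) (to_remove : List Int) : Decidable (Pre_remove_and_shift nested_dict to_remove) := by unfold Pre_remove_and_shift; infer_instance
def pvWitness_remove_and_shift : (List (Int × List (Int × Int))) × List Int := ([(1, [(0, 5), (2, 6)])], [1])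

def Spec_remove_and_shift (nested_dict : List (Int × List (Int × Int))) (to_remove : List Int) (out : List (Int × List (Int × Int))) : Prop := out = remove_and_shift_alt nested_dict to_remove
instance (nested_dict : List (Int × List (Int × Int))) (to_remove : List Int) (out : List (Int × List (Int × Int))) : Decidable (Spec_remove_and_shift nested_dict to_remove out) := by unfold Spec_remove_and_shift; infer_instance

-- ===== CLAIM (what is proved, stated in full; the proofs are below) =====
def Claim_equal_remove_and_shift : Prop := ∀ (nested_dict : List (Int × List (Int × Int))) (to_remove : List Int), Dom_remove_and_shift nested_dict to_remove → Pre_remove_and_shift nested_dict to_remove → Spec_remove_and_shift nested_dict to_remove (remove_and_shift nested_dict to_remove)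

-- ===== LEMMAS AND PROOFS =====

-- If the first n elements of l are < k and the rest are ≥ k, countP (· < k) is n.
theorem countP_lt_eq_of_threshold (l : List Int) (k : Int) :
    ∀ (n : Nat), n ≤ l.length →
    (∀ (j : Nat) (hj : j < l.length), j < n → l[j] < k) →
    (∀ (j : Nat) (hj : j < l.length), n ≤ j → k ≤ l[j]) →
    l.countP (fun x => decide (x < k)) = n := by
  induction l with
  | nil => intro n hn _ _; simp at hn ⊢; omega
  | cons a t ih =>
    intro n hn h1 h2
    cases n with
    | zero =>
      apply List.countP_eq_zero.mpr
      intro x hx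
      obtain ⟨j, hj, rfl⟩ := List.mem_iff_getElem.mp hx
      simpa using not_lt.mpr (h2 j hj (Nat.zero_le _))
    | succ m =>
      have ha : a < k := h1 0 (by simp) (Nat.succ_pos m)
      have : (a :: t).countP (fun x => decide (x < k)) = t.countP (fun x => decide (x < k)) + 1 := by
        simp [ha]
      rw [this, ih m (by simpa using Nat.succ_le_succ_iff.mp hn)
        (fun j hj hjm => by simpa using h1 (j + 1) (by simpa using Nat.succ_lt_succ hj) (Nat.succ_lt_succ hjm))
        (fun j hj hmj => by simpa using h2 (j + 1) (by simpa using Nat.succ_lt_succ hj) (Nat.succ_le_succ hmj))]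

-- On a ≤-sorted list, the bisect_left position is the count of elements < k.
theorem bisect_eq_countP (l : List Int) (k : Int) (hpw : l.Pairwise (· ≤ ·)) :
    l.countP (fun x => decide (x < k)) = PySem.List.bisectLeft l k := by
  obtain ⟨hle, hlt, hge⟩ := PySem.List.bisectLeft_spec l k hpw
  exact countP_lt_eq_of_threshold l k _ hle hlt hge

-- countP (· < k2) splits at k1 ≤ k2 into counts below k1 and in [k1, k2).
theorem countP_lt_split (l : List Int) (k1 k2 : Int) (h : k1 ≤ k2) :
    l.countP (fun x => decide (x < k2))
      = l.countP (fun x => decide (x < k1)) + l.countP (fun x => decide (k1 ≤ x ∧ x < k2)) := by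
  induction l with
  | nil => simp
  | cons a t ih =>
    rw [List.countP_cons, List.countP_cons, List.countP_cons, ih]
    split_ifs <;> simp_all <;> omega

-- On a ≤-sorted list, k ∈ l iff the bisect_left position is in range and holds k.
theorem mem_iff_bisect_hit (l : List Int) (k : Int) (hpw : l.Pairwise (· ≤ ·)) :
    (PySem.List.bisectLeft l k < l.length ∧ l.getD (PySem.List.bisectLeft l k) 0 = k) ↔ k ∈ l := by
  obtain ⟨hle, hlt, hge⟩ := PySem.List.bisectLeft_spec l k hpw
  set c := PySem.List.bisectLeft l k with hc
  constructor
  · rintro ⟨hcl, hget⟩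
    rw [List.getD_eq_getElem l 0 hcl] at hget
    exact hget ▸ List.getElem_mem hcl
  · intro hk
    obtain ⟨j, hj, rfl⟩ := List.mem_iff_getElem.mp hk
    have hcj : c ≤ j := by
      by_contra h
      exact lt_irrefl _ (hlt j hj (not_le.mp h))
    have hcl : c < l.length := lt_of_le_of_lt hcj hj
    refine ⟨hcl, ?_⟩
    rw [List.getD_eq_getElem l 0 hcl]
    have h2 : l[c] ≤ l[j] := by
      rcases lt_or_eq_of_le hcj with h | h
      · exact (List.pairwise_iff_getElem.mp hpw) c j hcl hj h
      · simp only [h, le_refl]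
    exact le_antisymm h2 (hge c hcl (Nat.le_refl c))

-- A fold that skips the elements satisfying p is a fold over the filtered list.
theorem foldl_if_skip {α β : Type} (p : α → Bool) (g : β → α → β) :
    ∀ (l : List α) (init : β),
      l.foldl (fun d q => if p q = true then d else g d q) init
        = (l.filter (fun q => !p q)).foldl g init := by
  intro l
  induction l with
  | nil => intro init; rfl
  | cons a t ih =>
    intro init
    by_cases h : p a = true <;> simp [h, ih]

-- A filterMap whose function is none exactly on p is a map over the filtered list.
theorem filterMap_eq_filter_map {α β : Type} (p : α → Bool) (g : α → β) (f : α → Option β)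
    (hf : ∀ q, f q = if p q = true then none else some (g q)) :
    ∀ (l : List α), l.filterMap f = (l.filter (fun q => !p q)).map g := by
  intro l
  induction l with
  | nil => rfl
  | cons a t ih =>
    by_cases h : p a = true <;>
      simp [hf a, h, ih]

-- The relabelling k ↦ k - (count of removed keys below k) is strictly monotone on kept keys.
theorem newKey_strictMono (rem : List Int) (hpw : rem.Pairwise (· ≤ ·)) (hnd : rem.Nodup)
    (k1 k2 n1 n2 : Int) (h12 : k1 < k2)
    (h1 : pvNewKey? rem k1 = some n1) (h2 : pvNewKey? rem k2 = some n2) : n1 < n2 := by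
  unfold pvNewKey? at h1 h2
  simp only at h1 h2
  split_ifs at h1 h2 with hm1 hm2
  have hk1 : k1 ∉ rem := fun h => hm1 ((mem_iff_bisect_hit rem k1 hpw).mpr h)
  injection h1 with e1
  injection h2 with e2
  subst e1 e2
  have hc1 : (PySem.List.bisectLeft rem k1 : Int) = rem.countP (fun x => decide (x < k1)) := by
    rw [bisect_eq_countP rem k1 hpw]
  have hc2 : (PySem.List.bisectLeft rem k2 : Int) = rem.countP (fun x => decide (x < k2)) := by
    rw [bisect_eq_countP rem k2 hpw]
  have hsplit := countP_lt_split rem k1 k2 (le_of_lt h12)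
  have hmid : rem.countP (fun x => decide (k1 ≤ x ∧ x < k2)) ≤ (k2 - k1 - 1).toNat := by
    have hsub : (rem.filter (fun x => decide (k1 ≤ x ∧ x < k2))).Nodup := hnd.filter _
    have : (rem.filter (fun x => decide (k1 ≤ x ∧ x < k2))).length ≤ (Finset.Ico (k1 + 1) k2).card := by
      rw [← List.toFinset_card_of_nodup hsub]
      apply Finset.card_le_card
      intro x hx
      have hxm := List.mem_toFinset.mp hx
      have hxr := List.mem_of_mem_filter hxm
      have hxp := List.of_mem_filter hxm
      simp only [decide_eq_true_eq] at hxp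
      have hne : x ≠ k1 := fun he => hk1 (he ▸ hxr)
      simp only [Finset.mem_Ico]
      omega
    rw [List.countP_eq_length_filter]
    calc _ ≤ (Finset.Ico (k1 + 1) k2).card := this
    _ = (k2 - (k1 + 1)).toNat := Int.card_Ico _ _
    _ ≤ (k2 - k1 - 1).toNat := by omega
  have hfin : (PySem.List.bisectLeft rem k2 : Int) - (PySem.List.bisectLeft rem k1 : Int) ≤ k2 - k1 - 1 := by
    rw [hc1, hc2, hsplit]
    push_cast
    omega
  omega

-- For one inner dict with distinct keys, A's insert loop produces exactly B's filterMap.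
theorem inner_eq (to_remove : List Int) (inner : List (Int × Int))
    (hnd : (inner.map Prod.fst).Nodup) :
    (inner.foldl (fun new_inner q =>
        if PySem.Set.contains (PySem.Set.ofList to_remove) q.1 then new_inner
        else new_inner.insert
          (q.1 - (PySem.Set.ofList to_remove).foldl (fun acc r => if r < q.1 then acc + 1 else acc) 0) q.2)
      PySem.Dict.empty).items
    = inner.filterMap (fun q =>
        (pvNewKey? (PySem.List.sorted (PySem.Set.ofList to_remove) (fun x => x) false) q.1).map
          (fun nk => (nk, q.2))) := by
  set s : PySem.Set Int := PySem.Set.ofList to_remove with hs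
  set rem : List Int := PySem.List.sorted s (fun x => x) false with hrem
  have hpw : rem.Pairwise (· ≤ ·) := by
    simpa using PySem.List.sorted_pairwise (xs := s) (key := fun x => x)
  have hperm : rem.Perm s := PySem.List.sorted_perm s (fun x => x) false
  have hremnd : rem.Nodup := hperm.symm.nodup_iff.mp (PySem.Set.nodup_ofList to_remove)
  -- the shift value in A equals the bisect position
  have hcount : ∀ k : Int, s.foldl (fun acc r => if r < k then acc + 1 else acc) (0 : Int)
      = (PySem.List.bisectLeft rem k : Int) := by
    intro k
    rw [PySem.List.foldl_ite_add_one (p := fun r => r < k) (l := s) (a := 0)]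
    rw [← hperm.countP_eq, bisect_eq_countP rem k hpw]
    simp
  -- the skip condition in A is "pvNewKey? = none"
  have hskip : ∀ k : Int, PySem.Set.contains s k
      = decide (PySem.List.bisectLeft rem k < rem.length ∧ rem.getD (PySem.List.bisectLeft rem k) 0 = k) := by
    intro k
    rw [Bool.eq_iff_iff]
    simp only [decide_eq_true_eq]
    rw [mem_iff_bisect_hit rem k hpw, hperm.mem_iff]
    simp
  -- B's per-element option in terms of the skip predicate and the key function
  have hnewkey : ∀ q : Int × Int,
      (pvNewKey? rem q.1).map (fun nk => (nk, q.2))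
      = if PySem.Set.contains s q.1 = true then none
        else some ((q.1 - (PySem.List.bisectLeft rem q.1 : Int), q.2) : Int × Int) := by
    intro q
    rw [hskip q.1]
    unfold pvNewKey?
    by_cases h : PySem.List.bisectLeft rem q.1 < rem.length ∧ rem.getD (PySem.List.bisectLeft rem q.1) 0 = q.1
    · rw [if_pos h, if_pos (decide_eq_true h)]
      rfl
    · rw [if_neg h, if_neg (fun hc => h (of_decide_eq_true hc))]
      rfl
  -- rewrite A's inner loop: the step function with the shift replaced by the bisect position
  have hstep : (fun (new_inner : PySem.Dict Int Int) (q : Int × Int) =>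
      if PySem.Set.contains s q.1 then new_inner
      else new_inner.insert (q.1 - s.foldl (fun acc r => if r < q.1 then acc + 1 else acc) 0) q.2)
      = (fun (new_inner : PySem.Dict Int Int) (q : Int × Int) =>
      if PySem.Set.contains s q.1 then new_inner
      else new_inner.insert (q.1 - (PySem.List.bisectLeft rem q.1 : Int)) q.2) := by
    funext ni q
    rw [hcount q.1]
  rw [hstep, foldl_if_skip (fun q : Int × Int => PySem.Set.contains s q.1)
      (fun (ni : PySem.Dict Int Int) (q : Int × Int) =>
        ni.insert (q.1 - (PySem.List.bisectLeft rem q.1 : Int)) q.2)]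
  -- the kept keys are distinct, and so are their relabellings
  set kept : List (Int × Int) := inner.filter (fun q => !PySem.Set.contains s q.1) with hkept
  have hksub : (kept.map Prod.fst).Nodup := by
    have : kept.Sublist inner := List.filter_sublist
    exact hnd.sublist (this.map Prod.fst)
  have hkeptnew : ∀ q ∈ kept, pvNewKey? rem q.1 = some (q.1 - (PySem.List.bisectLeft rem q.1 : Int)) := by
    intro q hq
    have hcontains : PySem.Set.contains s q.1 = false := by
      have := List.of_mem_filter hq
      cases hb : PySem.Set.contains s q.1
      · rfl
      · rw [hb] at this; simp at this
    have h := hnewkey q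
    rw [hcontains] at h
    simp only [Bool.false_eq_true, if_false] at h
    cases ho : pvNewKey? rem q.1 with
    | none => rw [ho] at h; simp at h
    | some nk =>
      rw [ho] at h
      simp only [Option.map_some, Option.some.injEq, Prod.mk.injEq] at h
      rw [h.1]
  have hnewnd : (kept.map (fun q : Int × Int => q.1 - (PySem.List.bisectLeft rem q.1 : Int))).Nodup := by
    have hkn : kept.Nodup := (List.Nodup.of_map Prod.fst hnd).filter _
    refine hkn.map_on ?_
    intro x hx y hy he
    rcases lt_trichotomy x.1 y.1 with h | h | h
    · exact absurd he (ne_of_lt (newKey_strictMono rem hpw hremnd x.1 y.1 _ _ h (hkeptnew x hx) (hkeptnew y hy)))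
    · exact List.inj_on_of_nodup_map hksub hx hy h
    · exact absurd he.symm (ne_of_lt (newKey_strictMono rem hpw hremnd y.1 x.1 _ _ h (hkeptnew y hy) (hkeptnew x hx)))
  rw [PySem.Dict.items_foldl_insert_fresh kept
      (fun q : Int × Int => q.1 - (PySem.List.bisectLeft rem q.1 : Int))
      (fun q : Int × Int => q.2) PySem.Dict.empty
      (fun a _ => PySem.Dict.contains_empty _) hnewnd]
  rw [filterMap_eq_filter_map (fun q : Int × Int => PySem.Set.contains s q.1)
      (fun q : Int × Int => (q.1 - (PySem.List.bisectLeft rem q.1 : Int), q.2)) _ hnewkey inner]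
  rw [hkept]
  rfl

-- ===== VERDICT (by name: the statement is the Claim_ definition above) =====
theorem remove_and_shift_spec : Claim_equal_remove_and_shift := by
  intro nested_dict to_remove _ hpre
  obtain ⟨houter, hinner⟩ := hpre
  unfold Spec_remove_and_shift remove_and_shift remove_and_shift_alt
  dsimp only
  rw [PySem.Dict.items_foldl_insert_fresh nested_dict
      (fun p : Int × List (Int × Int) => p.1)
      (fun p : Int × List (Int × Int) => (p.2.foldl (fun (new_inner : PySem.Dict Int Int) (q : Int × Int) =>
          if PySem.Set.contains (PySem.Set.ofList to_remove) q.1 then new_inner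
          else new_inner.insert
            (q.1 - (PySem.Set.ofList to_remove).foldl (fun acc r => if r < q.1 then acc + 1 else acc) 0) q.2)
        PySem.Dict.empty).items) PySem.Dict.empty
      (fun a _ => PySem.Dict.contains_empty _) houter]
  simp only [PySem.Dict.empty, List.nil_append]
  apply List.map_congr_left
  intro p hp
  exact congrArg (Prod.mk p.1) (inner_eq to_remove p.2 (hinner p hp))
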